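-- pv_equiv track=rewrite | github.com/xination/lvl_builder | mytool.py | check_min_xi_xf_for_a_bandN
-- ===== SOURCE A (Python) =====
-- def check_min_xi_xf_for_a_bandN( list_lvl, bandNtotal, band_largest ):
--
--     # the index mean the bandN
--
--     # list_bandL is to store the largest left  bound (xi) in a given bandN.
--     # list_bandU is to store the smaller right bound (xf) in a given bandN.
--     #   -----------------
--     #   |               |
--     # bandL           bandU
--     #
--     num = bandNtotal
--     if( (band_largest+1) > bandNtotal): num = band_largest+1
--     list_bandL = [ -1   for _ in range( num ) ]
--     list_bandU = [ 9999 for _ in range( num ) ]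
--
--     # the list index corresponds to the bandN
--     # if we have bandN from -2, -1, 0, to 4.
--     # [ 0,  1,  2,  3,  4,  -2,  -1]
--     # if we have bandN from  5, 6, 7. bandNtotal = 3, but band_largest = 7
--     # [ 0,  1,  2,  3,  4,  5,  6,  7]
--
--
--     for lvl in list_lvl:
--         # set short-handed notations.
--         xi = lvl['xi']
--         xf = lvl['xf']
--         bandL = lvl['bandL']
--         bandU = lvl['bandU']
--
--         if( xi >  list_bandL[ bandL ] ): list_bandL[ bandL ] = xi
--         if( xf <  list_bandU[ bandU ] ): list_bandU[ bandU ] = xf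
--
--     return list_bandL, list_bandU
-- ===== SOURCE B (Python) =====
-- def check_min_xi_xf_for_a_bandN(list_lvl, bandNtotal, band_largest):
--     # group the xi's by bandL and the xf's by bandU, then write each band's
--     # extremum into the preallocated sentinel lists in one assignment per band.
--     num = max(bandNtotal, band_largest + 1)
--     list_bandL = [-1] * num
--     list_bandU = [9999] * num
--     xis = {}
--     xfs = {}
--     for lvl in list_lvl:
--         xis.setdefault(lvl['bandL'], []).append(lvl['xi'])
--         xfs.setdefault(lvl['bandU'], []).append(lvl['xf'])
--     for band, vals in xis.items():
--         list_bandL[band] = max(list_bandL[band], *vals)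
--     for band, vals in xfs.items():
--         list_bandU[band] = min(list_bandU[band], *vals)
--     return list_bandL, list_bandU
-- ===== Notes on version B (the rewrite author's own statement) =====
-- stated objective: alternative
-- what changed: A's single pass that conditionally mutates two preallocated sentinel lists per level is replaced by a grouping pass (two dicts collecting the xi's per bandL and the xf's per bandU) followed by one max/min write per band; Pre_ excludes exactly the inputs on which A raises (a level missing one of the four keys, or a band outside [-num, num) for the preallocated lists).
import Mathlib
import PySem

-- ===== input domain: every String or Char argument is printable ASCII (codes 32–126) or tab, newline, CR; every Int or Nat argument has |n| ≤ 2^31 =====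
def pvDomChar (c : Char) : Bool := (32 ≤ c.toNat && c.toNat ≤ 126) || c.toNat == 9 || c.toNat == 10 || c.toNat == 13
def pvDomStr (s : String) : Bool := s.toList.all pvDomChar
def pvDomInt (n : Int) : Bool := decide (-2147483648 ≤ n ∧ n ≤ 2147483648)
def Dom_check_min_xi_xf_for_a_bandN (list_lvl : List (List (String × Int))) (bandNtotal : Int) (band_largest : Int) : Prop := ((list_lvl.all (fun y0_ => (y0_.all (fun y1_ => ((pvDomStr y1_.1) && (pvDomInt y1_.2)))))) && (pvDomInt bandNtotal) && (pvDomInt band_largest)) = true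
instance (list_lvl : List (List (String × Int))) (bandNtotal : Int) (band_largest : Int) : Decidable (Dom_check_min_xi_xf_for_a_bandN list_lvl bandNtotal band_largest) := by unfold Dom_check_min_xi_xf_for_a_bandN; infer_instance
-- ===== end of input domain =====

-- B replaces A's single mutating pass with a grouping pass (two dicts: xi's by bandL,
-- xf's by bandU) followed by one extremum write per band — objective: alternative
-- decomposition, same cost.

-- ===== PORT A =====
-- A's for-loop: each lvl is a dict (association list, first-match lookup); the two indexed
-- reads/writes use Python index semantics (negative wrap, IndexError = none).
def aLoop : List (List (String × Int)) → List Int → List Int → Option (List Int × List Int)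
  | [], L, U => some (L, U)
  | lvl :: rest, L, U =>
    match (PySem.Dict.mk lvl).get? "xi", (PySem.Dict.mk lvl).get? "xf",
          (PySem.Dict.mk lvl).get? "bandL", (PySem.Dict.mk lvl).get? "bandU" with
    | some xi, some xf, some bandL, some bandU =>
      match PySem.List.pyGet? L bandL, PySem.List.pyGet? U bandU with
      | some curL, some curU =>
        aLoop rest (if curL < xi then PySem.List.pySetD L bandL xi else L)
                   (if xf < curU then PySem.List.pySetD U bandU xf else U)
      | _, _ => none
    | _, _, _, _ => none

def check_min_xi_xf_for_a_bandN (list_lvl : List (List (String × Int))) (bandNtotal : Int) (band_largest : Int) : List Int × List Int :=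
  let num := if band_largest + 1 > bandNtotal then band_largest + 1 else bandNtotal
  let list_bandL := (PySem.List.pyRange 0 num 1).map (fun _ => (-1 : Int))
  let list_bandU := (PySem.List.pyRange 0 num 1).map (fun _ => (9999 : Int))
  (aLoop list_lvl list_bandL list_bandU).getD ([], [])

-- ===== PORT B =====
-- B's grouping loop: xis.setdefault(lvl['bandL'], []).append(lvl['xi']) mutates the list
-- held in the dict, i.e. xis[b] becomes xis.get(b, []) + [xi]: exactly Dict.modify b [] (· ++ [xi]).
def bGroup : List (List (String × Int)) → PySem.Dict Int (List Int) → PySem.Dict Int (List Int) → Option (PySem.Dict Int (List Int) × PySem.Dict Int (List Int))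
  | [], dL, dU => some (dL, dU)
  | lvl :: rest, dL, dU =>
    match (PySem.Dict.mk lvl).get? "bandL", (PySem.Dict.mk lvl).get? "xi",
          (PySem.Dict.mk lvl).get? "bandU", (PySem.Dict.mk lvl).get? "xf" with
    | some b, some v, some b', some v' =>
      bGroup rest (dL.modify b [] (fun x => x ++ [v])) (dU.modify b' [] (fun x => x ++ [v']))
    | _, _, _, _ => none

-- B's write loop: for band, vals in d.items(): L[band] = cmb(L[band], *vals)
-- (max/min of several arguments is the left fold of the binary max/min).
def bWrite (cmb : Int → Int → Int) : List (Int × List Int) → List Int → Option (List Int)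
  | [], L => some L
  | (b, vs) :: rest, L =>
    match PySem.List.pyGet? L b with
    | some cur => bWrite cmb rest (PySem.List.pySetD L b (vs.foldl cmb cur))
    | none => none

def check_min_xi_xf_for_a_bandN_alt (list_lvl : List (List (String × Int))) (bandNtotal : Int) (band_largest : Int) : List Int × List Int :=
  let num := max bandNtotal (band_largest + 1)
  let list_bandL := List.replicate num.toNat (-1 : Int)
  let list_bandU := List.replicate num.toNat (9999 : Int)
  match bGroup list_lvl PySem.Dict.empty PySem.Dict.empty with
  | none => ([], [])
  | some (xis, xfs) =>
    match bWrite max xis.items list_bandL with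
    | none => ([], [])
    | some L =>
      match bWrite min xfs.items list_bandU with
      | none => ([], [])
      | some U => (L, U)

-- ===== PRECONDITION & SPEC =====
-- Pre_ excludes exactly the inputs on which A raises: a lvl missing one of the four keys
-- (KeyError) or whose band lies outside [-num, num) (IndexError on the preallocated lists).
def Pre_check_min_xi_xf_for_a_bandN (list_lvl : List (List (String × Int))) (bandNtotal : Int) (band_largest : Int) : Prop :=
  (list_lvl.all (fun lvl =>
    ((PySem.Dict.mk lvl).get? "xi").isSome &&
    ((PySem.Dict.mk lvl).get? "xf").isSome &&
    (((PySem.Dict.mk lvl).get? "bandL").any (fun b =>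
        decide (-(if band_largest + 1 > bandNtotal then band_largest + 1 else bandNtotal) ≤ b ∧
                b < (if band_largest + 1 > bandNtotal then band_largest + 1 else bandNtotal)))) &&
    (((PySem.Dict.mk lvl).get? "bandU").any (fun b =>
        decide (-(if band_largest + 1 > bandNtotal then band_largest + 1 else bandNtotal) ≤ b ∧
                b < (if band_largest + 1 > bandNtotal then band_largest + 1 else bandNtotal)))))) = true
instance (list_lvl : List (List (String × Int))) (bandNtotal : Int) (band_largest : Int) : Decidable (Pre_check_min_xi_xf_for_a_bandN list_lvl bandNtotal band_largest) := by unfold Pre_check_min_xi_xf_for_a_bandN; infer_instance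
def pvWitness_check_min_xi_xf_for_a_bandN : (List (List (String × Int))) × Int × Int :=
  ([[("xi", 3), ("xf", 7), ("bandL", 0), ("bandU", -1)], [("xi", 5), ("xf", 6), ("bandL", 1), ("bandU", 1)]], 2, 1)

def Spec_check_min_xi_xf_for_a_bandN (list_lvl : List (List (String × Int))) (bandNtotal : Int) (band_largest : Int) (out : List Int × List Int) : Prop := out = check_min_xi_xf_for_a_bandN_alt list_lvl bandNtotal band_largest
instance (list_lvl : List (List (String × Int))) (bandNtotal : Int) (band_largest : Int) (out : List Int × List Int) : Decidable (Spec_check_min_xi_xf_for_a_bandN list_lvl bandNtotal band_largest out) := by unfold Spec_check_min_xi_xf_for_a_bandN; infer_instance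

-- ===== CLAIM (what is proved, stated in full; the proofs are below) =====
def Claim_equal_check_min_xi_xf_for_a_bandN : Prop := ∀ (list_lvl : List (List (String × Int))) (bandNtotal : Int) (band_largest : Int), Dom_check_min_xi_xf_for_a_bandN list_lvl bandNtotal band_largest → Pre_check_min_xi_xf_for_a_bandN list_lvl bandNtotal band_largest → Spec_check_min_xi_xf_for_a_bandN list_lvl bandNtotal band_largest (check_min_xi_xf_for_a_bandN list_lvl bandNtotal band_largest)

-- ===== LEMMAS AND PROOFS =====

-- first-match lookup, totalised (used only where Pre_ guarantees the key is present)
def keyD (lvl : List (String × Int)) (k : String) : Int := ((PySem.Dict.mk lvl).get? k).getD 0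
-- Python's wrapped index for -num ≤ b < num, 0 < num
def nIdx (num b : Int) : Nat := (PySem.Int.mod b num).toNat

def GoodLvl (num : Int) (lvl : List (String × Int)) : Prop :=
  ((PySem.Dict.mk lvl).get? "xi").isSome = true ∧
  ((PySem.Dict.mk lvl).get? "xf").isSome = true ∧
  ((PySem.Dict.mk lvl).get? "bandL").isSome = true ∧
  ((PySem.Dict.mk lvl).get? "bandU").isSome = true ∧
  (-num ≤ keyD lvl "bandL" ∧ keyD lvl "bandL" < num) ∧
  (-num ≤ keyD lvl "bandU" ∧ keyD lvl "bandU" < num)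

-- A-side step in normalised (Nat-index) form
def stepA (cmp : Int → Int → Bool) (bk vk : String) (num : Int) (L : List Int) (lvl : List (String × Int)) : List Int :=
  if cmp (L.getD (nIdx num (keyD lvl bk)) 0) (keyD lvl vk)
  then L.set (nIdx num (keyD lvl bk)) (keyD lvl vk) else L

-- the (band, value) pairs B groups, in level order
def pairsOf (bk vk : String) (l : List (List (String × Int))) : List (Int × Int) :=
  l.map (fun lvl => (keyD lvl bk, keyD lvl vk))

-- B's grouping dict as a pure fold over those pairs
def groupDict (ps : List (Int × Int)) : PySem.Dict Int (List Int) :=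
  ps.foldl (fun d p => d.modify p.1 [] (fun x => x ++ [p.2])) PySem.Dict.empty

lemma mod_small (num b : Int) (h0 : 0 < num) (h1 : -num ≤ b) (h2 : b < num) :
    PySem.Int.mod b num = if 0 ≤ b then b else b + num := by
  rw [PySem.Int.mod_eq_emod_of_pos h0]
  split_ifs with hb
  · exact Int.emod_eq_of_lt hb h2
  · have h3 : (b + num * 1) % num = b % num := Int.add_mul_emod_self_left b num 1
    rw [mul_one] at h3
    have h4 : (b + num) % num = b + num := Int.emod_eq_of_lt (by omega) (by omega)
    omega

lemma nIdx_lt (num b : Int) (h0 : 0 < num) :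
    nIdx num b < num.toNat := by
  have h3 := PySem.Int.mod_nonneg (a := b) h0
  have h4 := PySem.Int.mod_lt (a := b) h0
  unfold nIdx; omega

lemma pyIdx_mod (num b : Int) (N : Nat) (h0 : 0 < num) (hN : N = num.toNat)
    (h1 : -num ≤ b) (h2 : b < num) :
    PySem.List.pyIdx? N b = some (nIdx num b) := by
  have hm := mod_small num b h0 h1 h2
  unfold PySem.List.pyIdx? nIdx
  rw [hm]
  split_ifs with hb hbN hbn <;> first
    | rfl
    | (exfalso; omega)
    | (congr 1; omega)

lemma pyGet?_mod (L : List Int) (num b : Int) (h0 : 0 < num) (hlen : L.length = num.toNat)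
    (h1 : -num ≤ b) (h2 : b < num) :
    PySem.List.pyGet? L b = some (L.getD (nIdx num b) 0) := by
  have hi := pyIdx_mod num b L.length h0 hlen h1 h2
  have hk := nIdx_lt num b h0
  unfold PySem.List.pyGet?
  rw [hi, Option.bind_some, List.getD_eq_getElem L 0 (by omega),
      List.getElem?_eq_getElem (by omega)]

lemma pySetD_mod (L : List Int) (num b v : Int) (h0 : 0 < num) (hlen : L.length = num.toNat)
    (h1 : -num ≤ b) (h2 : b < num) :
    PySem.List.pySetD L b v = L.set (nIdx num b) v := by
  have hi := pyIdx_mod num b L.length h0 hlen h1 h2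
  unfold PySem.List.pySetD PySem.List.pySet?
  rw [hi, Option.map_some, Option.getD_some]

lemma length_stepA (cmp bk vk num L lvl) : (stepA cmp bk vk num L lvl).length = L.length := by
  unfold stepA; split <;> simp

-- A's option loop is the pure double fold over normalised steps
lemma aLoop_eq (num : Int) (h0 : 0 < num) :
    ∀ (l : List (List (String × Int))) (L U : List Int),
    (∀ lvl ∈ l, GoodLvl num lvl) → L.length = num.toNat → U.length = num.toNat →
    aLoop l L U = some
      (l.foldl (stepA (fun m v => decide (m < v)) "bandL" "xi" num) L,
       l.foldl (stepA (fun m v => decide (v < m)) "bandU" "xf" num) U) := by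
  intro l
  induction l with
  | nil => intro L U _ _ _; simp [aLoop]
  | cons lvl rest ih =>
    intro L U hg hL hU
    obtain ⟨hxi, hxf, hbL, hbU, hrL, hrU⟩ := hg lvl (by simp)
    have exi : (PySem.Dict.mk lvl).get? "xi" = some (keyD lvl "xi") := by
      unfold keyD; cases h : (PySem.Dict.mk lvl).get? "xi" <;> simp_all
    have exf : (PySem.Dict.mk lvl).get? "xf" = some (keyD lvl "xf") := by
      unfold keyD; cases h : (PySem.Dict.mk lvl).get? "xf" <;> simp_all
    have ebL : (PySem.Dict.mk lvl).get? "bandL" = some (keyD lvl "bandL") := by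
      unfold keyD; cases h : (PySem.Dict.mk lvl).get? "bandL" <;> simp_all
    have ebU : (PySem.Dict.mk lvl).get? "bandU" = some (keyD lvl "bandU") := by
      unfold keyD; cases h : (PySem.Dict.mk lvl).get? "bandU" <;> simp_all
    have hrec := ih (stepA (fun m v => decide (m < v)) "bandL" "xi" num L lvl)
      (stepA (fun m v => decide (v < m)) "bandU" "xf" num U lvl)
      (fun x hx => hg x (List.mem_cons_of_mem _ hx))
      (by rw [length_stepA]; exact hL) (by rw [length_stepA]; exact hU)
    unfold aLoop
    rw [exi, exf, ebL, ebU]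
    dsimp only
    rw [pyGet?_mod L num _ h0 hL hrL.1 hrL.2,
        pyGet?_mod U num _ h0 hU hrU.1 hrU.2]
    dsimp only
    rw [List.foldl_cons, List.foldl_cons, ← hrec]
    simp only [stepA, decide_eq_true_eq]
    rw [pySetD_mod L num _ _ h0 hL hrL.1 hrL.2, pySetD_mod U num _ _ h0 hU hrU.1 hrU.2]

-- pointwise characterisation of A's pure fold
lemma fold_pointwise (cmp : Int → Int → Bool) (bk vk : String) (num : Int) (h0 : 0 < num) :
    ∀ (l : List (List (String × Int))) (L : List Int),
    (∀ lvl ∈ l, -num ≤ keyD lvl bk ∧ keyD lvl bk < num) → L.length = num.toNat →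
    l.foldl (stepA cmp bk vk num) L =
      (List.range num.toNat).map (fun k =>
        l.foldl (fun m lvl => if nIdx num (keyD lvl bk) = k ∧ cmp m (keyD lvl vk) then keyD lvl vk else m)
          (L.getD k 0)) := by
  intro l
  induction l with
  | nil =>
    intro L _ hL
    simp only [List.foldl_nil]
    apply List.ext_getElem (by simp [hL])
    intro k h1 h2
    simp only [List.getElem_map, List.getElem_range]
    rw [List.getD_eq_getElem L 0 (by simpa [hL] using h2)]
  | cons lvl rest ih =>
    intro L hb hL
    rw [List.foldl_cons,
        ih (stepA cmp bk vk num L lvl)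
          (fun x hx => hb x (List.mem_cons_of_mem _ hx))
          (by rw [length_stepA]; exact hL)]
    apply List.map_congr_left
    intro k hk
    rw [List.foldl_cons]
    congr 1
    have hkN : k < num.toNat := List.mem_range.mp hk
    have hjr := hb lvl (by simp)
    have hj : nIdx num (keyD lvl bk) < num.toNat := nIdx_lt num _ h0
    unfold stepA
    by_cases hc : cmp (L.getD (nIdx num (keyD lvl bk)) 0) (keyD lvl vk) = true
    · rw [if_pos hc]
      rw [List.getD_eq_getElem _ 0 (by simp [hL]; omega),
          List.getElem_set]
      by_cases hjk : nIdx num (keyD lvl bk) = k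
      · rw [if_pos hjk, if_pos ⟨hjk, by rw [← hjk]; exact hc⟩]
      · rw [if_neg hjk, if_neg (by intro h; exact hjk h.1),
            List.getD_eq_getElem L 0 (by omega)]
    · rw [if_neg hc]
      by_cases hjk : nIdx num (keyD lvl bk) = k
      · rw [if_neg (by intro h; exact hc (by rw [hjk]; exact h.2))]
      · rw [if_neg (by intro h; exact hjk h.1)]

-- B's grouping loop is the pure pair of folds over the (band, value) pairs
lemma bGroup_eq (num : Int) :
    ∀ (l : List (List (String × Int))) (dL dU : PySem.Dict Int (List Int)),
    (∀ lvl ∈ l, GoodLvl num lvl) →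
    bGroup l dL dU = some
      ((pairsOf "bandL" "xi" l).foldl (fun d p => d.modify p.1 [] (fun x => x ++ [p.2])) dL,
       (pairsOf "bandU" "xf" l).foldl (fun d p => d.modify p.1 [] (fun x => x ++ [p.2])) dU) := by
  intro l
  induction l with
  | nil => intro dL dU _; simp [bGroup, pairsOf]
  | cons lvl rest ih =>
    intro dL dU hg
    obtain ⟨hxi, hxf, hbL, hbU, _, _⟩ := hg lvl (by simp)
    have exi : (PySem.Dict.mk lvl).get? "xi" = some (keyD lvl "xi") := by
      unfold keyD; cases h : (PySem.Dict.mk lvl).get? "xi" <;> simp_all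
    have exf : (PySem.Dict.mk lvl).get? "xf" = some (keyD lvl "xf") := by
      unfold keyD; cases h : (PySem.Dict.mk lvl).get? "xf" <;> simp_all
    have ebL : (PySem.Dict.mk lvl).get? "bandL" = some (keyD lvl "bandL") := by
      unfold keyD; cases h : (PySem.Dict.mk lvl).get? "bandL" <;> simp_all
    have ebU : (PySem.Dict.mk lvl).get? "bandU" = some (keyD lvl "bandU") := by
      unfold keyD; cases h : (PySem.Dict.mk lvl).get? "bandU" <;> simp_all
    unfold bGroup
    rw [ebL, exi, ebU, exf]
    dsimp only
    rw [ih _ _ (fun x hx => hg x (List.mem_cons_of_mem _ hx))]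
    simp [pairsOf]

lemma bGroup_empty_eq (num : Int) (l : List (List (String × Int)))
    (h : ∀ lvl ∈ l, GoodLvl num lvl) :
    bGroup l PySem.Dict.empty PySem.Dict.empty =
      some (groupDict (pairsOf "bandL" "xi" l), groupDict (pairsOf "bandU" "xf" l)) := by
  rw [bGroup_eq num l _ _ h]; rfl

lemma keys_groupDict (ps : List (Int × Int)) :
    (groupDict ps).keys = PySem.Set.update (PySem.Dict.empty : PySem.Dict Int (List Int)).keys (ps.map Prod.fst) :=
  PySem.Dict.keys_foldl_modify_key ps Prod.fst [] (fun _ p => (fun x => x ++ [p.2])) PySem.Dict.empty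

lemma mem_keys_groupDict (ps : List (Int × Int)) (b : Int) :
    b ∈ (groupDict ps).keys ↔ b ∈ ps.map Prod.fst := by
  rw [keys_groupDict, PySem.Set.mem_update, PySem.Dict.keys_empty]
  simp

lemma nodup_keys_groupDict (ps : List (Int × Int)) : (groupDict ps).keys.Nodup :=
  PySem.Dict.nodup_keys_foldl_modify_key ps Prod.fst [] (fun _ p => (fun x => x ++ [p.2]))
    PySem.Dict.empty PySem.Dict.nodup_keys_empty

lemma getD_groupDict (ps : List (Int × Int)) (c : Int) :
    (groupDict ps).getD c [] = (ps.filter (fun p => p.1 == c)).map (fun p => p.2) := by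
  unfold groupDict
  rw [PySem.Dict.getD_foldl_modify_append, PySem.Dict.getD_empty, List.nil_append]

lemma items_groupDict (ps : List (Int × Int)) :
    (groupDict ps).items = (groupDict ps).keys.map (fun k => (k, (groupDict ps).getD k [])) :=
  PySem.Dict.items_eq_map_keys _ (nodup_keys_groupDict ps) []

-- B's write loop is the pure fold over normalised group-write steps
lemma bWrite_eq (cmb : Int → Int → Int) (num : Int) (h0 : 0 < num) :
    ∀ (items : List (Int × List Int)) (L : List Int),
    (∀ p ∈ items, -num ≤ p.1 ∧ p.1 < num) → L.length = num.toNat →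
    bWrite cmb items L = some
      (items.foldl (fun L p => L.set (nIdx num p.1) (p.2.foldl cmb (L.getD (nIdx num p.1) 0))) L) := by
  intro items
  induction items with
  | nil => intro L _ _; simp [bWrite]
  | cons p rest ih =>
    intro L hr hL
    obtain ⟨b, vs⟩ := p
    have hb := hr (b, vs) (by simp)
    unfold bWrite
    rw [pyGet?_mod L num b h0 hL hb.1 hb.2]
    dsimp only
    rw [pySetD_mod L num b _ h0 hL hb.1 hb.2,
        ih _ (fun x hx => hr x (List.mem_cons_of_mem _ hx)) (by simp [hL]),
        List.foldl_cons]

-- pointwise characterisation of B's write fold (generic in the per-slot update)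
lemma fold_pointwiseW {α : Type} (band : α → Int) (upd : Int → α → Int) (num : Int) (h0 : 0 < num) :
    ∀ (l : List α) (L : List Int),
    (∀ a ∈ l, -num ≤ band a ∧ band a < num) → L.length = num.toNat →
    l.foldl (fun L a => L.set (nIdx num (band a)) (upd (L.getD (nIdx num (band a)) 0) a)) L =
      (List.range num.toNat).map (fun k =>
        l.foldl (fun m a => if nIdx num (band a) = k then upd m a else m) (L.getD k 0)) := by
  intro l
  induction l with
  | nil =>
    intro L _ hL
    simp only [List.foldl_nil]
    apply List.ext_getElem (by simp [hL])
    intro k h1 h2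
    simp only [List.getElem_map, List.getElem_range]
    rw [List.getD_eq_getElem L 0 (by simpa [hL] using h2)]
  | cons a rest ih =>
    intro L hb hL
    rw [List.foldl_cons, ih _ (fun x hx => hb x (List.mem_cons_of_mem _ hx)) (by simp [hL])]
    apply List.map_congr_left
    intro k hk
    rw [List.foldl_cons]
    congr 1
    have hkN : k < num.toNat := List.mem_range.mp hk
    have hj : nIdx num (band a) < num.toNat := nIdx_lt num _ h0
    rw [List.getD_eq_getElem _ 0 (by simp [hL]; omega), List.getElem_set]
    by_cases hjk : nIdx num (band a) = k
    · rw [if_pos hjk, if_pos hjk, hjk]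
    · rw [if_neg hjk, if_neg hjk]
      exact (List.getD_eq_getElem L 0 (by omega)).symm

-- foldl max / foldl min depend only on the SET of elements folded over
lemma foldl_max_eq_of_mem_iff (a : Int) (l₁ l₂ : List Int) (h : ∀ x, x ∈ l₁ ↔ x ∈ l₂) :
    l₁.foldl max a = l₂.foldl max a := by
  have h1 := PySem.List.le_foldl_max l₁ a
  have h2 := PySem.List.le_foldl_max l₂ a
  apply le_antisymm
  · rcases PySem.List.foldl_max_mem l₁ a with e | e
    · rw [e]; exact h2.1
    · exact h2.2 _ ((h _).mp e)
  · rcases PySem.List.foldl_max_mem l₂ a with e | e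
    · rw [e]; exact h1.1
    · exact h1.2 _ ((h _).mpr e)

lemma foldl_min_le (l : List Int) (a : Int) :
    l.foldl min a ≤ a ∧ ∀ y ∈ l, l.foldl min a ≤ y := by
  induction l generalizing a with
  | nil => simp
  | cons x rest ih =>
    refine ⟨le_trans ((ih (min a x)).1) (min_le_left a x), ?_⟩
    intro y hy
    rcases List.mem_cons.mp hy with rfl | hy
    · exact le_trans ((ih (min a y)).1) (min_le_right a y)
    · exact (ih (min a x)).2 y hy

lemma foldl_min_mem (l : List Int) (a : Int) :
    l.foldl min a = a ∨ l.foldl min a ∈ l := by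
  induction l generalizing a with
  | nil => left; rfl
  | cons x rest ih =>
    rcases ih (min a x) with e | e
    · rw [List.foldl_cons, e]
      rcases min_choice a x with e' | e'
      · left; exact e'
      · right; rw [e']; simp
    · right; rw [List.foldl_cons]; exact List.mem_cons_of_mem _ e

lemma foldl_min_eq_of_mem_iff (a : Int) (l₁ l₂ : List Int) (h : ∀ x, x ∈ l₁ ↔ x ∈ l₂) :
    l₁.foldl min a = l₂.foldl min a := by
  have h1 := foldl_min_le l₁ a
  have h2 := foldl_min_le l₂ a
  apply le_antisymm
  · rcases foldl_min_mem l₂ a with e | e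
    · rw [e]; exact h1.1
    · exact h1.2 _ ((h _).mpr e)
  · rcases foldl_min_mem l₁ a with e | e
    · rw [e]; exact h2.1
    · exact h2.2 _ ((h _).mp e)

-- the per-slot folds agree: A's conditional update over the levels vs B's group write
lemma slot_eq (cmp : Int → Int → Bool) (cmb : Int → Int → Int)
    (hcomb : ∀ m v, (if cmp m v then v else m) = cmb m v)
    (hext : ∀ (a : Int) (l₁ l₂ : List Int), (∀ x, x ∈ l₁ ↔ x ∈ l₂) → l₁.foldl cmb a = l₂.foldl cmb a)
    (bk vk : String) (num : Int) (d : Int) (l : List (List (String × Int))) (k : Nat) :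
    l.foldl (fun m lvl => if nIdx num (keyD lvl bk) = k ∧ cmp m (keyD lvl vk) then keyD lvl vk else m) d =
    (groupDict (pairsOf bk vk l)).items.foldl
      (fun m p => if nIdx num p.1 = k then p.2.foldl cmb m else m) d := by
  -- LHS → fold of cmb over the values whose band maps to slot k, in level order
  have hL : l.foldl (fun m lvl => if nIdx num (keyD lvl bk) = k ∧ cmp m (keyD lvl vk) then keyD lvl vk else m) d
      = (((pairsOf bk vk l).filter (fun p => decide (nIdx num p.1 = k))).map (fun p => p.2)).foldl cmb d := by
    have e1 : ∀ (m : Int) (lvl : List (String × Int)),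
        (if nIdx num (keyD lvl bk) = k ∧ cmp m (keyD lvl vk) then keyD lvl vk else m)
        = (if nIdx num (keyD lvl bk) = k then cmb m (keyD lvl vk) else m) := by
      intro m lvl
      by_cases h1 : nIdx num (keyD lvl bk) = k
      · rw [if_pos h1, ← hcomb]
        by_cases h2 : cmp m (keyD lvl vk) = true
        · rw [if_pos ⟨h1, h2⟩, if_pos h2]
        · rw [if_neg (fun h => h2 h.2), if_neg h2]
      · rw [if_neg (fun h => h1 h.1), if_neg h1]
    calc l.foldl (fun m lvl => if nIdx num (keyD lvl bk) = k ∧ cmp m (keyD lvl vk) then keyD lvl vk else m) d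
        = l.foldl (fun m lvl => if nIdx num (keyD lvl bk) = k then cmb m (keyD lvl vk) else m) d := by
          apply PySem.List.foldl_congr_mem; intro m lvl _; exact e1 m lvl
      _ = (l.filter (fun lvl => decide (nIdx num (keyD lvl bk) = k))).foldl
            (fun m lvl => cmb m (keyD lvl vk)) d :=
          PySem.List.foldl_ite_eq_foldl_filter (fun lvl => nIdx num (keyD lvl bk) = k) _ l d
      _ = _ := by
          rw [pairsOf, List.filter_map, List.foldl_map, List.foldl_map]
          rfl
  -- RHS → fold of cmb over all grouped values whose band maps to slot k
  have hR : (groupDict (pairsOf bk vk l)).items.foldl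
        (fun m p => if nIdx num p.1 = k then p.2.foldl cmb m else m) d
      = ((((groupDict (pairsOf bk vk l)).items.filter (fun p => decide (nIdx num p.1 = k))).flatMap
          (fun p => p.2))).foldl cmb d := by
    rw [PySem.List.foldl_ite_eq_foldl_filter (fun p : Int × List Int => nIdx num p.1 = k)
          (fun m (p : Int × List Int) => p.2.foldl cmb m) _ d,
        List.foldl_flatMap]
  rw [hL, hR]
  apply hext
  -- same set of values on both sides
  intro x
  constructor
  · intro hx
    obtain ⟨p, hp, hx⟩ := List.mem_map.mp hx
    obtain ⟨hpm, hpk⟩ := List.mem_filter.mp hp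
    apply List.mem_flatMap.mpr
    refine ⟨(p.1, (groupDict (pairsOf bk vk l)).getD p.1 []), ?_, ?_⟩
    · apply List.mem_filter.mpr
      refine ⟨?_, hpk⟩
      rw [items_groupDict]
      exact List.mem_map.mpr ⟨p.1, (mem_keys_groupDict _ _).mpr (List.mem_map.mpr ⟨p, hpm, rfl⟩), rfl⟩
    · rw [getD_groupDict]
      exact List.mem_map.mpr ⟨p, List.mem_filter.mpr ⟨hpm, by simp⟩, hx⟩
  · intro hx
    obtain ⟨q, hq, hx⟩ := List.mem_flatMap.mp hx
    obtain ⟨hqm, hqk⟩ := List.mem_filter.mp hq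
    rw [items_groupDict] at hqm
    obtain ⟨b, _, rfl⟩ := List.mem_map.mp hqm
    rw [getD_groupDict] at hx
    obtain ⟨p, hp, hx⟩ := List.mem_map.mp hx
    obtain ⟨hpm, hpb⟩ := List.mem_filter.mp hp
    apply List.mem_map.mpr
    refine ⟨p, List.mem_filter.mpr ⟨hpm, ?_⟩, hx⟩
    have : p.1 = b := by simpa using hpb
    simpa [this] using hqk
  
lemma pre_good (list_lvl : List (List (String × Int))) (bandNtotal band_largest : Int)
    (h : Pre_check_min_xi_xf_for_a_bandN list_lvl bandNtotal band_largest) :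
    ∀ lvl ∈ list_lvl, GoodLvl (if band_largest + 1 > bandNtotal then band_largest + 1 else bandNtotal) lvl := by
  intro lvl hm
  unfold Pre_check_min_xi_xf_for_a_bandN at h
  rw [List.all_eq_true] at h
  have h2 := h lvl hm
  simp only [Bool.and_eq_true] at h2
  obtain ⟨⟨⟨e1, e2⟩, e3⟩, e4⟩ := h2
  unfold GoodLvl keyD
  cases hL : (PySem.Dict.mk lvl).get? "bandL" with
  | none => rw [hL] at e3; simp at e3
  | some b =>
    cases hU : (PySem.Dict.mk lvl).get? "bandU" with
    | none => rw [hU] at e4; simp at e4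
    | some c =>
      rw [hL] at e3
      rw [hU] at e4
      simp only [Option.any_some, decide_eq_true_eq] at e3 e4
      exact ⟨e1, e2, by rfl, by rfl, by simpa using e3, by simpa using e4⟩

lemma ite_lt_max (m v : Int) : (if m < v then v else m) = max m v := by
  by_cases h : m < v
  · rw [if_pos h, max_eq_right h.le]
  · rw [if_neg h, max_eq_left (not_lt.mp h)]

lemma ite_lt_min (m v : Int) : (if v < m then v else m) = min m v := by
  by_cases h : v < m
  · rw [if_pos h, min_eq_right h.le]
  · rw [if_neg h, min_eq_left (not_lt.mp h)]

lemma num_eq (a b : Int) : max a (b + 1) = if b + 1 > a then b + 1 else a := by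
  rw [max_def]; split_ifs <;> omega

-- bands of every item of a group dict built from in-range pairs are in range
lemma items_range (ps : List (Int × Int)) (num : Int)
    (h : ∀ p ∈ ps, -num ≤ p.1 ∧ p.1 < num) :
    ∀ q ∈ (groupDict ps).items, -num ≤ q.1 ∧ q.1 < num := by
  intro q hq
  rw [items_groupDict] at hq
  obtain ⟨b, hb, rfl⟩ := List.mem_map.mp hq
  obtain ⟨p, hp, rfl⟩ := List.mem_map.mp ((mem_keys_groupDict _ _).mp hb)
  exact h p hp

-- ===== VERDICT (by name: the statement is the Claim_ definition above) =====
theorem check_min_xi_xf_for_a_bandN_spec : Claim_equal_check_min_xi_xf_for_a_bandN := by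
  intro list_lvl bandNtotal band_largest _ hpre
  unfold Spec_check_min_xi_xf_for_a_bandN
  unfold check_min_xi_xf_for_a_bandN check_min_xi_xf_for_a_bandN_alt
  have hgood := pre_good list_lvl bandNtotal band_largest hpre
  set num := if band_largest + 1 > bandNtotal then band_largest + 1 else bandNtotal with hnum
  rw [num_eq bandNtotal band_largest, ← hnum]
  dsimp only
  rw [bGroup_empty_eq num list_lvl hgood]
  dsimp only
  by_cases h0 : 0 < num
  · have hrL : ∀ p ∈ pairsOf "bandL" "xi" list_lvl, -num ≤ p.1 ∧ p.1 < num := by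
      intro p hp
      obtain ⟨lvl, hm, rfl⟩ := List.mem_map.mp hp
      exact (hgood lvl hm).2.2.2.2.1
    have hrU : ∀ p ∈ pairsOf "bandU" "xf" list_lvl, -num ≤ p.1 ∧ p.1 < num := by
      intro p hp
      obtain ⟨lvl, hm, rfl⟩ := List.mem_map.mp hp
      exact (hgood lvl hm).2.2.2.2.2
    have hlen0 : ((PySem.List.pyRange 0 num 1).map (fun _ => (-1 : Int))).length = num.toNat := by
      simp [PySem.List.length_pyRange_one]
    have hlen9 : ((PySem.List.pyRange 0 num 1).map (fun _ => (9999 : Int))).length = num.toNat := by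
      simp [PySem.List.length_pyRange_one]
    rw [aLoop_eq num h0 list_lvl _ _ hgood hlen0 hlen9, Option.getD_some,
        fold_pointwise _ "bandL" "xi" num h0 list_lvl _
          (fun lvl hm => (hgood lvl hm).2.2.2.2.1) hlen0,
        fold_pointwise _ "bandU" "xf" num h0 list_lvl _
          (fun lvl hm => (hgood lvl hm).2.2.2.2.2) hlen9,
        bWrite_eq max num h0 _ _ (items_range _ num hrL) (by simp),
        bWrite_eq min num h0 _ _ (items_range _ num hrU) (by simp)]
    dsimp only
    rw [fold_pointwiseW Prod.fst (fun m p => p.2.foldl max m) num h0 _ _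
          (items_range _ num hrL) (by simp),
        fold_pointwiseW Prod.fst (fun m p => p.2.foldl min m) num h0 _ _
          (items_range _ num hrU) (by simp)]
    refine Prod.ext ?_ ?_ <;> dsimp only
    · apply List.map_congr_left
      intro k hk
      have hkN : k < num.toNat := List.mem_range.mp hk
      have hA : ((PySem.List.pyRange 0 num 1).map (fun _ => (-1 : Int))).getD k 0 = -1 := by
        rw [List.getD_eq_getElem _ 0 (by simpa [PySem.List.length_pyRange_one] using hkN)]
        simp
      have hB : (List.replicate num.toNat (-1 : Int)).getD k 0 = -1 := by
        rw [List.getD_eq_getElem _ 0 (by simpa using hkN)]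
        simp
      rw [hA, hB]
      exact slot_eq (fun m v => decide (m < v)) max
        (fun m v => by simpa using ite_lt_max m v) foldl_max_eq_of_mem_iff
        "bandL" "xi" num (-1) list_lvl k
    · apply List.map_congr_left
      intro k hk
      have hkN : k < num.toNat := List.mem_range.mp hk
      have hA : ((PySem.List.pyRange 0 num 1).map (fun _ => (9999 : Int))).getD k 0 = 9999 := by
        rw [List.getD_eq_getElem _ 0 (by simpa [PySem.List.length_pyRange_one] using hkN)]
        simp
      have hB : (List.replicate num.toNat (9999 : Int)).getD k 0 = 9999 := by
        rw [List.getD_eq_getElem _ 0 (by simpa using hkN)]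
        simp
      rw [hA, hB]
      exact slot_eq (fun m v => decide (v < m)) min
        (fun m v => by simpa using ite_lt_min m v) foldl_min_eq_of_mem_iff
        "bandU" "xf" num 9999 list_lvl k
  · -- num ≤ 0: Pre_ forces the level list empty; both return ([], [])
    have hnil : list_lvl = [] := by
      cases hl : list_lvl with
      | nil => rfl
      | cons lvl rest =>
        exfalso
        have := (hgood lvl (by rw [hl]; simp)).2.2.2.2.1
        omega
    subst hnil
    rw [PySem.List.pyRange_one_eq_nil (by omega)]
    have : num.toNat = 0 := by omega
    rw [this]
    rfl
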